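-- pv_equiv track=rewrite | github.com/Devansh-rookie/git_summariser | get_file_dat_API.py | print_directory_tree
-- ===== SOURCE A (Python) =====
-- def print_directory_tree(tree_data):
--     """
--     Process and print a simple text-based tree structure.
--     """
--     # Build a hierarchical dictionary from the flat list of tree entries.
--
--     structure = ""
--     tree = {}
--     for item in tree_data.get("tree", []):
--         parts = item["path"].split("/")
--         current = tree
--         for part in parts:
--             current = current.setdefault(part, {})
--     def build_tree(subtree, prefix=""):
--         lines = []
--         for key, nested in sorted(subtree.items()):
--             lines.append(prefix + "|-- " + key)
--             lines.extend(build_tree(nested, prefix + "    "))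
--         return lines
--     structure = build_tree(tree)
--     return "\n".join(structure)
-- ===== SOURCE B (Python) =====
-- def print_directory_tree(tree_data):
--     # Flat re-implementation: collect every distinct path-prefix tuple,
--     # sort the tuples lexicographically, render each by its depth alone.
--     nodes = set()
--     for item in tree_data.get("tree", []):
--         parts = item["path"].split("/")
--         for i in range(1, len(parts) + 1):
--             nodes.add(tuple(parts[:i]))
--     return "\n".join("    " * (len(t) - 1) + "|-- " + t[-1] for t in sorted(nodes))
-- ===== Notes on version B (the rewrite author's own statement) =====
-- stated objective: simpler
-- what changed: B drops the nested setdefault-built dict and the recursive sorted-children DFS entirely: it collects every distinct path-prefix tuple in a set, sorts the tuples lexicographically once, and renders each line from the tuple's depth alone in one flat pass.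
import Mathlib
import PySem

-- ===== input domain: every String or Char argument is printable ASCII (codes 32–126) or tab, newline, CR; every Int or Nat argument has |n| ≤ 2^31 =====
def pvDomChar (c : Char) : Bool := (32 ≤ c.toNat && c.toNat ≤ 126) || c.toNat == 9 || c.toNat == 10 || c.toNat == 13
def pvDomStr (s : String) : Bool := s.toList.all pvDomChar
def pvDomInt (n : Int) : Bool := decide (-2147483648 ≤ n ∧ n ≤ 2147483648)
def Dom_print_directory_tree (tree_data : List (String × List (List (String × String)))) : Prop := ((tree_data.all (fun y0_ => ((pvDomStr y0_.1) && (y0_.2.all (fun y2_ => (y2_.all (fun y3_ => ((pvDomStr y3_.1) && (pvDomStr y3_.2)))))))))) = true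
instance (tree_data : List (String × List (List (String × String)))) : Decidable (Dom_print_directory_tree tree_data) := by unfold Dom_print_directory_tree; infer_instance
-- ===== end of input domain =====

-- B replaces A's nested-dict build plus recursive sorted DFS by one flat pass:
-- collect every distinct path-prefix tuple, sort them lexicographically, render each
-- line from its depth alone (objective: simpler).

-- ===== PORT A =====

-- the nested dict value: an insertion-ordered association list String ↦ subtree
inductive CT where
  | nil : CT
  | cons : String → CT → CT → CT

def ctSize : CT → Nat
  | CT.nil => 1
  | CT.cons _ c r => 1 + ctSize c + ctSize r

-- 'for part in parts: current = current.setdefault(part, {})' — the walk that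
-- inserts a chain of fresh keys at the first missing component (appended at the end,
-- as dict.setdefault does)
def insertPath : CT → List String → CT
  | t, [] => t
  | CT.nil, p :: ps => CT.cons p (insertPath CT.nil ps) CT.nil
  | CT.cons k c r, p :: ps =>
      if k = p then CT.cons k (insertPath c ps) r
      else CT.cons k c (insertPath r (p :: ps))
  termination_by t p => (p.length, ctSize t)
  decreasing_by
  all_goals simp_wf
  all_goals first
    | exact Prod.Lex.left _ _ (by omega)
    | exact Prod.Lex.right _ (by simp only [ctSize]; omega)

def ctToList : CT → List (String × CT)
  | CT.nil => []
  | CT.cons k c r => (k, c) :: ctToList r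

-- termination measure for build_tree's recursion over sorted children
def ctWt (l : List (String × CT)) : Nat := (l.map (fun p => ctSize p.2)).sum

theorem ctWt_perm {l m : List (String × CT)} (h : l.Perm m) : ctWt l = ctWt m := by
  unfold ctWt; exact List.Perm.sum_eq (h.map _)

theorem ctWt_ctToList_le (t : CT) : ctWt (ctToList t) < ctSize t := by
  induction t with
  | nil => simp [ctToList, ctWt, ctSize]
  | cons k c r ihc ihr =>
      simp only [ctToList, ctWt, List.map_cons, List.sum_cons, ctSize]
      unfold ctWt at ihr
      omega

-- build_tree: 'for key, nested in sorted(subtree.items()): append line; extend recursion'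
-- (the sorted-items loop and the recursive call fused into one list recursion)
def buildTree : List (String × CT) → String → List String
  | [], _ => []
  | (k, c) :: rest, pre =>
      (pre ++ "|-- " ++ k) ::
        (buildTree (PySem.List.sorted (ctToList c) Prod.fst) (pre ++ "    ") ++ buildTree rest pre)
  termination_by l _ => ctWt l
  decreasing_by
  · have h1 : ctWt (PySem.List.sorted (ctToList c) Prod.fst) = ctWt (ctToList c) :=
      ctWt_perm (PySem.List.sorted_perm _ _ _)
    have h2 := ctWt_ctToList_le c
    simp only [ctWt, List.map_cons, List.sum_cons] at *
    omega
  · simp only [ctWt, List.map_cons, List.sum_cons]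
    have h3 : 0 < ctSize c := by cases c <;> simp [ctSize]
    omega

-- item["path"] raises KeyError when "path" is absent; those inputs are outside Pre_,
-- the port totalises them with "" there (unclaimed)
def print_directory_tree (tree_data : List (String × List (List (String × String)))) : String :=
  let items := PySem.Dict.getD ⟨tree_data⟩ "tree" []
  let tree := items.foldl
    (fun t item => insertPath t ((PySem.Str.split? (PySem.Dict.getD ⟨item⟩ "path" "") "/").getD [])) CT.nil
  PySem.Str.join "\n" (buildTree (PySem.List.sorted (ctToList tree) Prod.fst) "")

-- ===== PORT B =====

-- '"    " * n'  (Python string repetition; exact for any n, negative gives "")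
def strMul (s : String) (n : Int) : String := String.ofList (PySem.List.pyRepeat s.toList n)

def print_directory_tree_alt (tree_data : List (String × List (List (String × String)))) : String :=
  let items := PySem.Dict.getD ⟨tree_data⟩ "tree" []
  let nodes : PySem.Set (List String) := items.foldl
    (fun s item =>
      let parts := (PySem.Str.split? (PySem.Dict.getD ⟨item⟩ "path" "") "/").getD []
      (PySem.List.pyRange 1 ((parts.length : Int) + 1)).foldl
        (fun s i => PySem.Set.add s (PySem.List.slice parts none (some i))) s)
    (PySem.Set.ofList [])
  PySem.Str.join "\n"
    ((PySem.List.sorted nodes (fun t => t)).map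
      (fun t => strMul "    " ((t.length : Int) - 1) ++ "|-- " ++ (PySem.List.pyGet? t (-1)).getD ""))

-- ===== PRECONDITION & SPEC =====

-- Pre_ excludes exactly the inputs on which Python A raises KeyError: a dict in the
-- "tree" list without a "path" key.
def Pre_print_directory_tree (tree_data : List (String × List (List (String × String)))) : Prop :=
  ((PySem.Dict.getD ⟨tree_data⟩ "tree" []).all (fun item => (PySem.Dict.get? ⟨item⟩ "path").isSome)) = true
instance (tree_data : List (String × List (List (String × String)))) : Decidable (Pre_print_directory_tree tree_data) := by unfold Pre_print_directory_tree; infer_instance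

def pvWitness_print_directory_tree : (List (String × List (List (String × String)))) :=
  [("tree", [[("path", "src/a.py")], [("path", "src")], [("path", "b/c")]])]

def Spec_print_directory_tree (tree_data : List (String × List (List (String × String)))) (out : String) : Prop := out = print_directory_tree_alt tree_data
instance (tree_data : List (String × List (List (String × String)))) (out : String) : Decidable (Spec_print_directory_tree tree_data out) := by unfold Spec_print_directory_tree; infer_instance

-- ===== CLAIM (what is proved, stated in full; the proofs are below) =====
def Claim_equal_print_directory_tree : Prop := ∀ (tree_data : List (String × List (List (String × String)))), Dom_print_directory_tree tree_data → Pre_print_directory_tree tree_data → Spec_print_directory_tree tree_data (print_directory_tree tree_data)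

-- ===== LEMMAS AND PROOFS =====

-- ---- lexicographic order on List String (the order Python sorts tuples by) ----

theorem lex_append_left (u : List String) {l m : List String} (h : l < m) : u ++ l < u ++ m := by
  induction u with
  | nil => simpa using h
  | cons a u ih =>
      rw [List.cons_append, List.cons_append, List.cons_lt_cons_iff]
      exact Or.inr ⟨rfl, ih⟩

theorem lex_prefix (u : List String) (x : String) (xs : List String) : u < u ++ x :: xs := by
  induction u with
  | nil => simpa using List.nil_lt_cons x xs
  | cons a u ih =>
      rw [List.cons_append, List.cons_lt_cons_iff]
      exact Or.inr ⟨rfl, ih⟩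

theorem lex_of_key_lt (base : List String) {k k' : String} (s s' : List String) (h : k < k') :
    base ++ k :: s < base ++ k' :: s' :=
  lex_append_left base (by rw [List.cons_lt_cons_iff]; exact Or.inl h)

-- ---- the nested dict, abstractly: lookup, path membership, well-formedness ----

def lookupCT : CT → String → Option CT
  | CT.nil, _ => none
  | CT.cons k c r, x => if k = x then some c else lookupCT r x

def hasPath : CT → List String → Bool
  | _, [] => true
  | t, k :: q => match lookupCT t k with
    | some c => hasPath c q
    | none => false

def wfCT : CT → Bool
  | CT.nil => true
  | CT.cons k c r => (lookupCT r k).isNone && wfCT c && wfCT r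

theorem lookup_insertPath (p : String) (ps : List String) :
    ∀ (t : CT) (x : String), lookupCT (insertPath t (p :: ps)) x =
      if x = p then some (insertPath ((lookupCT t p).getD CT.nil) ps) else lookupCT t x := by
  intro t
  induction t with
  | nil =>
      intro x
      by_cases hxp : x = p
      · subst hxp; simp [insertPath, lookupCT]
      · simp only [insertPath, lookupCT, if_neg hxp, if_neg (fun h : p = x => hxp h.symm)]
  | cons k c r ihc ihr =>
      intro x
      by_cases hkp : k = p
      · subst hkp
        by_cases hxk : k = x
        · subst hxk; simp [insertPath, lookupCT]
        · simp [insertPath, lookupCT, hxk]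
          exact fun h => absurd h.symm hxk
      · by_cases hxk : k = x
        · subst hxk
          simp [insertPath, lookupCT, hkp, fun h : k = p => hkp h]
        · by_cases hxp : x = p
          · subst hxp
            simp [insertPath, lookupCT, hkp, hxk, ihr]
          · simp [insertPath, lookupCT, hkp, hxk, hxp, ihr]

theorem hasPath_nil (q : List String) : hasPath CT.nil q = decide (q = []) := by
  cases q <;> simp [hasPath, lookupCT]

theorem hasPath_insertPath : ∀ (p : List String) (t : CT) (q : List String),
    hasPath (insertPath t p) q = (hasPath t q || q.isPrefixOf p) := by
  intro p
  induction p with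
  | nil =>
      intro t q
      cases q with
      | nil => simp [insertPath, hasPath]
      | cons b qs => simp [insertPath, List.isPrefixOf]
  | cons a ps ih =>
      intro t q
      cases q with
      | nil => simp [hasPath]
      | cons b qs =>
          simp only [hasPath, lookup_insertPath]
          by_cases hba : b = a
          · subst hba
            rw [if_pos rfl]
            show hasPath (insertPath ((lookupCT t b).getD CT.nil) ps) qs = _
            rw [ih]
            cases h : lookupCT t b with
            | some c => simp [h, List.isPrefixOf]
            | none =>
                cases qs with
                | nil => simp [h, hasPath_nil, List.isPrefixOf]
                | cons x xs => simp [h, hasPath_nil, List.isPrefixOf]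
          · rw [if_neg hba]
            have : (b == a) = false := by simpa using hba
            simp [List.isPrefixOf, this]

theorem wf_insertPath : ∀ (t : CT) (p : List String), wfCT t = true → wfCT (insertPath t p) = true := by
  intro t p
  induction t, p using insertPath.induct with
  | case1 t => simpa [insertPath] using id
  | case2 p ps ih =>
      intro _
      simp only [insertPath, wfCT, lookupCT, Bool.and_eq_true, Option.isNone_none]
      simpa using ih rfl
  | case3 c r p ps ih =>
      intro hwf
      simp only [insertPath, eq_self_iff_true, if_true]
      simp only [wfCT, Bool.and_eq_true] at hwf ⊢
      exact ⟨⟨hwf.1.1, ih hwf.1.2⟩, hwf.2⟩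
  | case4 k c r p ps hkp ih =>
      intro hwf
      simp only [insertPath, if_neg hkp, wfCT, Bool.and_eq_true] at *
      refine ⟨⟨?_, hwf.1.2⟩, ih hwf.2⟩
      rw [lookup_insertPath]
      rw [if_neg (fun h : k = p => hkp h)]
      exact hwf.1.1

theorem hasPath_foldl (P : List (List String)) : ∀ (t : CT) (q : List String),
    hasPath (P.foldl insertPath t) q = (hasPath t q || P.any (fun p => q.isPrefixOf p)) := by
  induction P with
  | nil => simp
  | cons p P ih =>
      intro t q
      simp only [List.foldl_cons, List.any_cons, ih, hasPath_insertPath]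
      cases hasPath t q <;> cases q.isPrefixOf p <;> simp

theorem wf_foldl (P : List (List String)) : ∀ (t : CT), wfCT t = true →
    wfCT (P.foldl insertPath t) = true := by
  induction P with
  | nil => simpa using fun _ h => h
  | cons p P ih =>
      intro t hwf
      exact ih _ (wf_insertPath t p hwf)

theorem lookup_eq_none_iff (t : CT) (k : String) :
    lookupCT t k = none ↔ ∀ c, (k, c) ∉ ctToList t := by
  induction t with
  | nil => simp [lookupCT, ctToList]
  | cons k' c' r ihc ihr =>
      by_cases h : k' = k
      · subst h
        simp only [lookupCT, ctToList, eq_self_iff_true, if_true]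
        constructor
        · intro h; cases h
        · intro h; exact absurd (by simp) (h c')
      · simp only [lookupCT, if_neg h, ctToList, List.mem_cons, ihr]
        constructor
        · rintro hr c (hc | hc)
          · exact h (congrArg Prod.fst hc).symm
          · exact hr c hc
        · intro hr c hc; exact hr c (Or.inr hc)

theorem mem_ctToList_iff (t : CT) (hwf : wfCT t = true) (k : String) (c : CT) :
    (k, c) ∈ ctToList t ↔ lookupCT t k = some c := by
  induction t with
  | nil => simp [lookupCT, ctToList]
  | cons k' c' r ihc ihr =>
      simp only [wfCT, Bool.and_eq_true] at hwf
      by_cases h : k' = k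
      · subst h
        simp only [ctToList, List.mem_cons, lookupCT, eq_self_iff_true, if_true,
          Option.some.injEq]
        constructor
        · rintro (hc | hc)
          · simpa using congrArg Prod.snd hc.symm
          · exact absurd hc ((lookup_eq_none_iff r k').mp
              (by simpa using hwf.1.1) c)
        · intro hc; exact Or.inl (by simp [hc])
      · simp only [ctToList, List.mem_cons, lookupCT, if_neg h, ihr hwf.2]
        constructor
        · rintro (hc | hc)
          · exact absurd (congrArg Prod.fst hc).symm h
          · exact hc
        · exact Or.inr

theorem wf_of_mem (t : CT) (hwf : wfCT t = true) {k : String} {c : CT}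
    (h : (k, c) ∈ ctToList t) : wfCT c = true := by
  induction t with
  | nil => simp [ctToList] at h
  | cons k' c' r ihc ihr =>
      simp only [wfCT, Bool.and_eq_true] at hwf
      rcases (by simpa [ctToList] using h : (k, c) = (k', c') ∨ (k, c) ∈ ctToList r) with hc | hc
      · have : c = c' := by simpa using congrArg Prod.snd hc
        exact this ▸ hwf.1.2
      · exact ihr hwf.2 hc

theorem ctSize_lt_of_mem {t : CT} {k : String} {c : CT} (h : (k, c) ∈ ctToList t) :
    ctSize c < ctSize t := by
  induction t with
  | nil => simp [ctToList] at h
  | cons k' c' r ihc ihr =>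
      rcases (by simpa [ctToList] using h : (k, c) = (k', c') ∨ (k, c) ∈ ctToList r) with hc | hc
      · have : c = c' := by simpa using congrArg Prod.snd hc
        subst this; simp [ctSize]; omega
      · have := ihr hc; simp [ctSize]; omega

theorem keys_nodup (t : CT) (hwf : wfCT t = true) : ((ctToList t).map Prod.fst).Nodup := by
  induction t with
  | nil => simp [ctToList]
  | cons k' c' r ihc ihr =>
      simp only [wfCT, Bool.and_eq_true] at hwf
      simp only [ctToList, List.map_cons, List.nodup_cons]
      refine ⟨?_, ihr hwf.2⟩
      intro hk
      rcases List.mem_map.mp hk with ⟨⟨k, c⟩, hc, he⟩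
      exact (lookup_eq_none_iff r k').mp (by simpa using hwf.1.1) c (by simpa [← he] using hc)

theorem sorted_keys_strict (t : CT) (hwf : wfCT t = true) :
    (PySem.List.sorted (ctToList t) Prod.fst).Pairwise (fun a b => a.1 < b.1) := by
  have hle := PySem.List.sorted_pairwise (ctToList t) Prod.fst
  have hnd : ((PySem.List.sorted (ctToList t) Prod.fst).map Prod.fst).Nodup :=
    (((PySem.List.sorted_perm (ctToList t) Prod.fst false).map Prod.fst).nodup_iff).mpr
      (keys_nodup t hwf)
  have hne := List.pairwise_map.mp hnd
  exact (hle.and hne).imp (fun h => lt_of_le_of_ne h.1 h.2)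

-- ---- the DFS skeleton of build_tree: the node paths it emits, in emission order ----

def dfsGo : List (String × CT) → List String → List (List String)
  | [], _ => []
  | (k, c) :: rest, base =>
      (base ++ [k]) ::
        (dfsGo (PySem.List.sorted (ctToList c) Prod.fst) (base ++ [k]) ++ dfsGo rest base)
  termination_by l _ => ctWt l
  decreasing_by
  · have h1 : ctWt (PySem.List.sorted (ctToList c) Prod.fst) = ctWt (ctToList c) :=
      ctWt_perm (PySem.List.sorted_perm _ _ _)
    have h2 := ctWt_ctToList_le c
    simp only [ctWt, List.map_cons, List.sum_cons] at *
    omega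
  · simp only [ctWt, List.map_cons, List.sum_cons]
    have h3 : 0 < ctSize c := by cases c <;> simp [ctSize]
    omega

-- the line build_tree prints for a node, as a function of the node path alone
def render (q : List String) : String :=
  strMul "    " ((q.length : Int) - 1) ++ "|-- " ++ (PySem.List.pyGet? q (-1)).getD ""

theorem strMul_zero (s : String) : strMul s 0 = "" := by
  simp [strMul, PySem.List.pyRepeat]

theorem strMul_succ (s : String) (n : Nat) : strMul s ((n : Int) + 1) = strMul s (n : Int) ++ s := by
  have h1 : ((n : Int) + 1).toNat = n + 1 := by omega
  have h2 : ((n : Int)).toNat = n := by omega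
  simp only [strMul, PySem.List.pyRepeat, h1, h2, List.replicate_succ']
  simp [List.flatten_append]

theorem pyGet_last (l : List String) (x : String) : PySem.List.pyGet? (l ++ [x]) (-1) = some x := by
  have hlen : (l ++ [x]).length = l.length + 1 := by simp
  have h1 : ¬(0 : Int) ≤ -1 := by omega
  have h2 : -((l.length + 1 : Nat) : Int) ≤ -1 := by omega
  have h3 : (l.length + 1) - ((1 : Int)).toNat = l.length := by omega
  simp only [PySem.List.pyGet?, PySem.List.pyIdx?, hlen, if_neg h1, if_pos h2]
  norm_num

theorem length_append_cast (base : List String) (k : String) :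
    (((base ++ [k]).length : Nat) : Int) = (base.length : Int) + 1 := by
  simp

theorem render_step (base : List String) (k : String) :
    render (base ++ [k]) = strMul "    " (base.length : Int) ++ "|-- " ++ k := by
  unfold render
  rw [pyGet_last, length_append_cast]
  norm_num

theorem buildTree_eq : ∀ (l : List (String × CT)) (base : List String),
    buildTree l (strMul "    " (base.length : Int)) = (dfsGo l base).map render := by
  intro l base
  induction l, base using dfsGo.induct with
  | case1 base => simp [buildTree, dfsGo]
  | case2 k c rest base ih1 ih2 =>
      rw [buildTree, dfsGo, List.map_cons, List.map_append]
      rw [render_step]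
      have hstep : strMul "    " (base.length : Int) ++ "    "
          = strMul "    " (((base ++ [k]).length : Nat) : Int) := by
        rw [length_append_cast, strMul_succ]
      rw [hstep, ih1, ih2]

theorem mem_dfsGo_iff : ∀ (l : List (String × CT)) (base : List String) (q : List String),
    q ∈ dfsGo l base ↔ ∃ p ∈ l, q = base ++ [p.1] ∨
      q ∈ dfsGo (PySem.List.sorted (ctToList p.2) Prod.fst) (base ++ [p.1]) := by
  intro l
  induction l with
  | nil => simp [dfsGo]
  | cons p rest ih =>
      intro base q
      obtain ⟨k, c⟩ := p
      rw [dfsGo]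
      simp only [List.mem_cons, List.mem_append, ih]
      constructor
      · rintro (h | h | ⟨p', hp', hd⟩)
        · exact ⟨(k, c), Or.inl rfl, Or.inl h⟩
        · exact ⟨(k, c), Or.inl rfl, Or.inr h⟩
        · exact ⟨p', Or.inr hp', hd⟩
      · rintro ⟨p', hp' | hp', hd⟩
        · subst hp'
          rcases hd with h | h
          · exact Or.inl h
          · exact Or.inr (Or.inl h)
        · exact Or.inr (Or.inr ⟨p', hp', hd⟩)

theorem dfs_extends : ∀ (l : List (String × CT)) (base : List String) (q : List String),
    q ∈ dfsGo l base → ∃ s, q = base ++ s ∧ s ≠ [] := by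
  intro l base
  induction l, base using dfsGo.induct with
  | case1 base => simp [dfsGo]
  | case2 k c rest base ih1 ih2 =>
      intro q hq
      rw [dfsGo] at hq
      rcases List.mem_cons.mp hq with h | h
      · exact ⟨[k], h, by simp⟩
      · rcases List.mem_append.mp h with h | h
        · rcases ih1 q h with ⟨s, hs, hne⟩
          exact ⟨k :: s, by simpa [List.append_assoc] using hs, by simp⟩
        · exact ih2 q h

theorem dfs_shape (l : List (String × CT)) (base : List String) (q : List String)
    (h : q ∈ dfsGo l base) : ∃ p ∈ l, ∃ s, q = base ++ p.1 :: s := by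
  rcases (mem_dfsGo_iff l base q).mp h with ⟨p, hp, hd | hd⟩
  · exact ⟨p, hp, [], hd⟩
  · rcases dfs_extends _ _ _ hd with ⟨s, hs, _⟩
    exact ⟨p, hp, s, by simpa [List.append_assoc] using hs⟩

theorem mem_dfs_aux : ∀ (N : Nat) (t : CT), ctSize t ≤ N → wfCT t = true →
    ∀ (base q : List String),
    (q ∈ dfsGo (PySem.List.sorted (ctToList t) Prod.fst) base ↔
      ∃ s, q = base ++ s ∧ s ≠ [] ∧ hasPath t s = true) := by
  intro N
  induction N with
  | zero => intro t hle; cases t <;> simp [ctSize] at hle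
  | succ N ih =>
      intro t hle hwf base q
      rw [mem_dfsGo_iff]
      constructor
      · rintro ⟨⟨k, c⟩, hp, hd⟩
        rw [PySem.List.mem_sorted] at hp
        have hlk : lookupCT t k = some c := (mem_ctToList_iff t hwf k c).mp hp
        have hwfc : wfCT c = true := wf_of_mem t hwf hp
        have hszc : ctSize c ≤ N := by have := ctSize_lt_of_mem hp; omega
        rcases hd with hd | hd
        · exact ⟨[k], hd, by simp, by simp [hasPath, hlk]⟩
        · rcases (ih c hszc hwfc (base ++ [k]) q).mp hd with ⟨s, hs, hne, hhp⟩
          exact ⟨k :: s, by simpa [List.append_assoc] using hs, by simp,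
            by simp [hasPath, hlk, hhp]⟩
      · rintro ⟨s, hs, hne, hhp⟩
        cases s with
        | nil => exact absurd rfl hne
        | cons k s' =>
            rw [hasPath] at hhp
            cases hlk : lookupCT t k with
            | none => rw [hlk] at hhp; simp at hhp
            | some c =>
                rw [hlk] at hhp
                have hp : (k, c) ∈ ctToList t := (mem_ctToList_iff t hwf k c).mpr hlk
                have hwfc : wfCT c = true := wf_of_mem t hwf hp
                have hszc : ctSize c ≤ N := by have := ctSize_lt_of_mem hp; omega
                refine ⟨(k, c), (PySem.List.mem_sorted _ _ _ _).mpr hp, ?_⟩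
                cases s' with
                | nil => exact Or.inl (by simpa using hs)
                | cons x xs =>
                    refine Or.inr ((ih c hszc hwfc (base ++ [k]) q).mpr
                      ⟨x :: xs, ?_, by simp, hhp⟩)
                    simpa [List.append_assoc] using hs

theorem mem_dfs (t : CT) (hwf : wfCT t = true) : ∀ (base q : List String),
    (q ∈ dfsGo (PySem.List.sorted (ctToList t) Prod.fst) base ↔
      ∃ s, q = base ++ s ∧ s ≠ [] ∧ hasPath t s = true) :=
  mem_dfs_aux (ctSize t) t le_rfl hwf

theorem pairwise_dfs : ∀ (l : List (String × CT)) (base : List String),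
    l.Pairwise (fun a b => a.1 < b.1) → (∀ p ∈ l, wfCT p.2 = true) →
    (dfsGo l base).Pairwise (· < ·) := by
  intro l base
  induction l, base using dfsGo.induct with
  | case1 base => simp [dfsGo]
  | case2 k c rest base ih1 ih2 =>
      intro hpw hwf
      rw [List.pairwise_cons] at hpw
      have hwfc : wfCT c = true := hwf (k, c) (by simp)
      rw [dfsGo, List.pairwise_cons, List.pairwise_append]
      refine ⟨?_, ?_, ?_, ?_⟩
      · intro q hq
        rcases List.mem_append.mp hq with h | h
        · rcases dfs_extends _ _ _ h with ⟨s, hs, hne⟩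
          cases s with
          | nil => exact absurd rfl hne
          | cons x xs =>
              rw [hs]
              exact lex_prefix (base ++ [k]) x xs
        · rcases dfs_shape _ _ _ h with ⟨p', hp', s, hs⟩
          rw [hs]
          have hk : k < p'.1 := hpw.1 p' hp'
          have : base ++ [k] = base ++ k :: [] := rfl
          rw [this]
          exact lex_of_key_lt base [] s hk
      · exact ih1 (sorted_keys_strict c hwfc)
          (fun p hp => wf_of_mem c hwfc ((PySem.List.mem_sorted _ _ _ _).mp hp))
      · exact ih2 hpw.2 (fun p hp => hwf p (by simp [hp]))
      · intro q1 h1 q2 h2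
        rcases dfs_extends _ _ _ h1 with ⟨s1, hs1, _⟩
        rcases dfs_shape _ _ _ h2 with ⟨p', hp', s2, hs2⟩
        have hk : k < p'.1 := hpw.1 p' hp'
        rw [hs1, hs2, List.append_assoc]
        exact lex_of_key_lt base s1 s2 hk

-- ---- the set of prefixes built by B ----

theorem mem_foldl_add {ι α : Type} [BEq α] [LawfulBEq α] (l : List ι) (f : ι → α) :
    ∀ (s : PySem.Set α) (x : α),
      (x ∈ l.foldl (fun s i => PySem.Set.add s (f i)) s) ↔ x ∈ s ∨ ∃ i ∈ l, x = f i := by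
  induction l with
  | nil => simp
  | cons a l ih =>
      intro s x
      simp only [List.foldl_cons, ih, PySem.Set.mem_add, List.mem_cons]
      constructor
      · rintro (⟨h | h⟩ | ⟨i, hi, he⟩)
        · exact Or.inl h
        · exact Or.inr ⟨a, Or.inl rfl, h⟩
        · exact Or.inr ⟨i, Or.inr hi, he⟩
      · rintro (h | ⟨i, hi | hi, he⟩)
        · exact Or.inl (Or.inl h)
        · exact Or.inl (Or.inr (hi ▸ he))
        · exact Or.inr ⟨i, hi, he⟩

theorem nodup_foldl_add {ι α : Type} [BEq α] [LawfulBEq α] (l : List ι) (f : ι → α) :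
    ∀ (s : PySem.Set α), s.Nodup → (l.foldl (fun s i => PySem.Set.add s (f i)) s).Nodup := by
  induction l with
  | nil => exact fun s h => h
  | cons a l ih =>
      intro s hs
      exact ih _ (PySem.Set.nodup_add s (f a) hs)

theorem prefix_slice_iff (parts q : List String) :
    (∃ i ∈ PySem.List.pyRange 1 ((parts.length : Int) + 1),
        q = PySem.List.slice parts none (some i)) ↔ q ≠ [] ∧ q <+: parts := by
  constructor
  · rintro ⟨i, hi, he⟩
    rw [PySem.List.mem_pyRange_iff_of_pos (by omega)] at hi
    rw [PySem.List.slice_to parts (by omega)] at he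
    subst he
    refine ⟨?_, List.take_prefix _ _⟩
    have : (parts.take i.toNat).length = i.toNat := by
      rw [List.length_take]; omega
    intro hnil
    rw [hnil] at this
    simp at this
    omega
  · rintro ⟨hne, hpre⟩
    refine ⟨(q.length : Int), ?_, ?_⟩
    · rw [PySem.List.mem_pyRange_iff_of_pos (by omega)]
      have h1 : q.length ≤ parts.length := hpre.length_le
      have h2 : 0 < q.length := List.length_pos_iff.mpr hne
      refine ⟨by omega, by omega, by omega⟩
    · rw [PySem.List.slice_to parts (by omega)]
      have := List.prefix_iff_eq_take.mp hpre
      simpa using this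

-- the two DecidableLT instances on List String sort identically
theorem sorted_instSwap (xs : List (List String)) :
    PySem.List.sorted xs (fun t => t) =
      @PySem.List.sorted (List String) (List String) _ LinearOrder.toDecidableLT xs (fun t => t) false := by
  rw [PySem.List.sorted_eq_foldl_insertBy,
    @PySem.List.sorted_eq_foldl_insertBy _ _ _ LinearOrder.toDecidableLT xs (fun t => t)]
  congr 1
  funext acc x
  congr 1
  funext a b
  exact decide_eq_decide.mpr Iff.rfl

-- ---- assembly ----

def partsOf (item : List (String × String)) : List String :=
  (PySem.Str.split? (PySem.Dict.getD ⟨item⟩ "path" "") "/").getD []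

def treeOf (items : List (List (String × String))) : CT :=
  items.foldl (fun t item => insertPath t (partsOf item)) CT.nil

def nodesOf (items : List (List (String × String))) : PySem.Set (List String) :=
  items.foldl (fun s item =>
      (PySem.List.pyRange 1 (((partsOf item).length : Int) + 1)).foldl
        (fun s i => PySem.Set.add s (PySem.List.slice (partsOf item) none (some i))) s)
    (PySem.Set.ofList [])

theorem mem_nodesOf_aux (items : List (List (String × String))) :
    ∀ (s : PySem.Set (List String)) (q : List String),
    (q ∈ items.foldl (fun s item =>
        (PySem.List.pyRange 1 (((partsOf item).length : Int) + 1)).foldl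
          (fun s i => PySem.Set.add s (PySem.List.slice (partsOf item) none (some i))) s) s) ↔
      q ∈ s ∨ ∃ item ∈ items, q ≠ [] ∧ q <+: partsOf item := by
  induction items with
  | nil => simp
  | cons it items ih =>
      intro s q
      simp only [List.foldl_cons, ih, mem_foldl_add, List.mem_cons]
      rw [show (∃ i ∈ PySem.List.pyRange 1 (((partsOf it).length : Int) + 1),
            q = PySem.List.slice (partsOf it) none (some i)) ↔ q ≠ [] ∧ q <+: partsOf it
          from prefix_slice_iff (partsOf it) q]
      constructor
      · rintro ((h | h) | ⟨item, hit, hp⟩)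
        · exact Or.inl h
        · exact Or.inr ⟨it, Or.inl rfl, h⟩
        · exact Or.inr ⟨item, Or.inr hit, hp⟩
      · rintro (h | ⟨item, hit | hit, hp⟩)
        · exact Or.inl (Or.inl h)
        · exact Or.inl (Or.inr (hit ▸ hp))
        · exact Or.inr ⟨item, hit, hp⟩

theorem mem_nodesOf (items : List (List (String × String))) (q : List String) :
    q ∈ nodesOf items ↔ ∃ item ∈ items, q ≠ [] ∧ q <+: partsOf item := by
  rw [nodesOf, mem_nodesOf_aux]
  simp [PySem.Set.ofList]

theorem nodup_nodesOf (items : List (List (String × String))) : (nodesOf items).Nodup := by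
  rw [nodesOf]
  generalize h : (PySem.Set.ofList ([] : List (List String))) = s0
  have hs0 : s0.Nodup := h ▸ PySem.Set.nodup_ofList []
  clear h
  induction items generalizing s0 with
  | nil => simpa using hs0
  | cons it items ih =>
      simp only [List.foldl_cons]
      exact ih _ (nodup_foldl_add _ _ s0 hs0)

theorem dfs_eq_sorted_nodes (items : List (List (String × String))) :
    PySem.List.sorted (nodesOf items) (fun t => t) =
      dfsGo (PySem.List.sorted (ctToList (treeOf items)) Prod.fst) [] := by
  have h_tree : treeOf items = (items.map partsOf).foldl insertPath CT.nil := by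
    rw [List.foldl_map]; rfl
  have hwfT : wfCT (treeOf items) = true := by
    rw [h_tree]; exact wf_foldl (items.map partsOf) CT.nil rfl
  have hpw : (dfsGo (PySem.List.sorted (ctToList (treeOf items)) Prod.fst) []).Pairwise (· < ·) :=
    pairwise_dfs _ [] (sorted_keys_strict _ hwfT)
      (fun p hp => wf_of_mem _ hwfT ((PySem.List.mem_sorted _ _ _ _).mp hp))
  have hndD : (dfsGo (PySem.List.sorted (ctToList (treeOf items)) Prod.fst) []).Nodup :=
    hpw.imp (fun h => ne_of_lt h)
  have hmem : ∀ q, q ∈ dfsGo (PySem.List.sorted (ctToList (treeOf items)) Prod.fst) [] ↔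
      q ∈ nodesOf items := by
    intro q
    rw [mem_dfs (treeOf items) hwfT [] q, mem_nodesOf]
    constructor
    · rintro ⟨sx, hq, hne, hhp⟩
      simp only [List.nil_append] at hq
      subst hq
      rw [h_tree, hasPath_foldl, hasPath_nil] at hhp
      have : (items.map partsOf).any (fun p => q.isPrefixOf p) = true := by
        rcases Bool.or_eq_true_iff.mp hhp with h | h
        · exact absurd (of_decide_eq_true h) hne
        · exact h
      rcases List.any_eq_true.mp this with ⟨p, hp, hpre⟩
      rcases List.mem_map.mp hp with ⟨item, hit, he⟩
      exact ⟨item, hit, hne, List.isPrefixOf_iff_prefix.mp (he ▸ hpre)⟩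
    · rintro ⟨item, hit, hne, hpre⟩
      refine ⟨q, by simp, hne, ?_⟩
      rw [h_tree, hasPath_foldl]
      refine Bool.or_eq_true_iff.mpr (Or.inr ?_)
      exact List.any_eq_true.mpr ⟨partsOf item, List.mem_map_of_mem hit,
        List.isPrefixOf_iff_prefix.mpr hpre⟩
  rw [sorted_instSwap]
  apply PySem.List.sorted_eq_of_perm_of_pairwise_lt
  · exact (List.perm_ext_iff_of_nodup hndD (nodup_nodesOf items)).mpr hmem
  · exact hpw

-- ===== VERDICT (by name: the statement is the Claim_ definition above) =====
theorem print_directory_tree_spec : Claim_equal_print_directory_tree := by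
  unfold Claim_equal_print_directory_tree
  intro td _ _
  unfold Spec_print_directory_tree
  show print_directory_tree td = print_directory_tree_alt td
  have hA : print_directory_tree td =
      PySem.Str.join "
"
        (buildTree (PySem.List.sorted
          (ctToList (treeOf (PySem.Dict.getD ⟨td⟩ "tree" []))) Prod.fst) "") := rfl
  have hB : print_directory_tree_alt td =
      PySem.Str.join "
"
        ((PySem.List.sorted (nodesOf (PySem.Dict.getD ⟨td⟩ "tree" [])) (fun t => t)).map render) := rfl
  rw [hA, hB]
  have hbt : buildTree (PySem.List.sorted
        (ctToList (treeOf (PySem.Dict.getD ⟨td⟩ "tree" []))) Prod.fst) "" =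
      (dfsGo (PySem.List.sorted
        (ctToList (treeOf (PySem.Dict.getD ⟨td⟩ "tree" []))) Prod.fst) []).map render := by
    have := buildTree_eq (PySem.List.sorted
      (ctToList (treeOf (PySem.Dict.getD ⟨td⟩ "tree" []))) Prod.fst) []
    simpa [strMul_zero] using this
  rw [hbt, dfs_eq_sorted_nodes]
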